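-- pv_equiv track=rewrite | github.com/Erik262/AoC | day_10/puzzle.py | subset_xor_arrays
-- ===== SOURCE A (Python) =====
-- def subset_xor_arrays(buttons):
--     n = len(buttons)
--     size = 1 << n
--     xs = [0] * size
--     cs = [0] * size
--
--     for s in range(1, size):
--         lsb = s & -s
--         i = lsb.bit_length() - 1
--         prev = s ^ lsb
--         xs[s] = xs[prev] ^ buttons[i]
--         cs[s] = cs[prev] + 1
--
--     return xs, cs
-- ===== SOURCE B (Python) =====
-- def subset_xor_arrays(buttons):
--     # progressive doubling: extend both arrays one button at a time
--     xs = [0]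
--     cs = [0]
--     for b in buttons:
--         xs += [x ^ b for x in xs]
--         cs += [c + 1 for c in cs]
--     return xs, cs
-- ===== Notes on version B (the rewrite author's own statement) =====
-- stated objective: alternative
-- what changed: Replaces the single LSB-bit-trick indexed fill over range(1, 2**n) (lsb = s & -s, bit_length, xs[s ^ lsb]) by progressive doubling: an outer loop over the buttons that appends the XOR/count images of the current arrays, never touching bit arithmetic.
import Mathlib
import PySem

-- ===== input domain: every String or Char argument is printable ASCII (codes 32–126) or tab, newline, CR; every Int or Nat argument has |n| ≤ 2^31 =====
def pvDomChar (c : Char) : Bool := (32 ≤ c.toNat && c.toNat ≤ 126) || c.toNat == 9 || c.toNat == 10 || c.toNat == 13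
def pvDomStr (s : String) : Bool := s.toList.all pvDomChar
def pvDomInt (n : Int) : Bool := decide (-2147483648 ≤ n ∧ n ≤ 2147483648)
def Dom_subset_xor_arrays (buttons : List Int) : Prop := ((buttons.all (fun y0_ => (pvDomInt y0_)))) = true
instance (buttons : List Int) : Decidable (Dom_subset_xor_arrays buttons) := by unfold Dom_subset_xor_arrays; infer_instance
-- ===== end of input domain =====

-- B replaces A's LSB-bit-trick indexed fill by progressive doubling over the buttons (alternative
-- decomposition, same O(2^n) cost); return values agree on every input, neither mutates its argument.

-- ===== PORT A =====
-- loop body of A's 'for s in range(1, size)'; the pyGetD defaults are never taken (prev < s ≤ len,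
-- 0 ≤ i < len(buttons) always, as proved below), matching Python's xs[prev], buttons[i] exactly.
def pvAstep (buttons : List Int) (st : List Int × List Int) (s : Int) : List Int × List Int :=
  let lsb := PySem.Int.band s (-s)
  let i : Int := (PySem.Int.bitLength lsb : Int) - 1
  let prev := PySem.Int.bxor s lsb
  (st.1.set s.toNat (PySem.Int.bxor (PySem.List.pyGetD st.1 prev 0) (PySem.List.pyGetD buttons i 0)),
   st.2.set s.toNat (PySem.List.pyGetD st.2 prev 0 + 1))

def subset_xor_arrays (buttons : List Int) : List Int × List Int :=
  let n := buttons.length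
  let size : Nat := 1 <<< n
  let xs : List Int := List.replicate size 0
  let cs : List Int := List.replicate size 0
  (PySem.List.pyRange 1 (size : Int)).foldl (pvAstep buttons) (xs, cs)

-- ===== PORT B =====
-- loop body of B's 'for b in buttons'
def pvBstep (st : List Int × List Int) (b : Int) : List Int × List Int :=
  (st.1 ++ st.1.map (fun x => PySem.Int.bxor x b),
   st.2 ++ st.2.map (fun c => c + 1))

def subset_xor_arrays_alt (buttons : List Int) : List Int × List Int :=
  buttons.foldl pvBstep ([0], [0])

-- ===== PRECONDITION & SPEC =====
def Spec_subset_xor_arrays (buttons : List Int) (out : List Int × List Int) : Prop := out = subset_xor_arrays_alt buttons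
instance (buttons : List Int) (out : List Int × List Int) : Decidable (Spec_subset_xor_arrays buttons out) := by unfold Spec_subset_xor_arrays; infer_instance

-- ===== CLAIM (what is proved, stated in full; the proofs are below) =====
def Claim_equal_subset_xor_arrays : Prop := ∀ (buttons : List Int), Dom_subset_xor_arrays buttons → Spec_subset_xor_arrays buttons (subset_xor_arrays buttons)

-- ===== LEMMAS AND PROOFS =====

-- the value both programs put at index s: XOR of buttons[i] over the set bits i of s
def pvF : List Int → Nat → Int
  | [], _ => 0
  | b :: t, s => PySem.Int.bxor (if s % 2 = 1 then b else 0) (pvF t (s / 2))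

-- the count both programs put at index s: number of set bits of s below n
def pvC : Nat → Nat → Int
  | 0, _ => 0
  | n + 1, s => (if s % 2 = 1 then 1 else 0) + pvC n (s / 2)

lemma pv_zero_bxor (a : Int) : PySem.Int.bxor 0 a = a := by
  rw [PySem.Int.bxor_comm]; exact PySem.Int.bxor_zero a

lemma pvF_zero (bs : List Int) : pvF bs 0 = 0 := by
  induction bs with
  | nil => rfl
  | cons b t ih => simp [pvF, ih]

lemma pvC_zero (n : Nat) : pvC n 0 = 0 := by
  induction n with
  | zero => rfl
  | succ n ih => simp [pvC, ih]

-- ---- Nat bit facts used to read off A's lsb arithmetic ----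

lemma pv_land_odd (m : Nat) (h : m % 2 = 1) : m &&& (m - 1) = m - 1 := by
  apply Nat.eq_of_testBit_eq
  intro i
  cases i with
  | zero =>
    have h1 : (m - 1) % 2 = 0 := by omega
    simp [Nat.testBit_zero, h, h1]
  | succ i =>
    have h1 : (m - 1) / 2 = m / 2 := by omega
    rw [Nat.testBit_land, Nat.testBit_succ, Nat.testBit_succ, h1, Bool.and_self]

lemma pv_xor_one_odd (m : Nat) (h : m % 2 = 1) : m ^^^ 1 = m - 1 := by
  apply Nat.eq_of_testBit_eq
  intro i
  cases i with
  | zero =>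
    have h1 : (m - 1) % 2 = 0 := by omega
    simp [Nat.testBit_zero, h1]
    omega
  | succ i =>
    have h1 : (m - 1) / 2 = m / 2 := by omega
    rw [Nat.testBit_xor, Nat.testBit_succ, Nat.testBit_succ, Nat.testBit_succ, h1]
    simp [Nat.zero_testBit]

lemma pv_land_even (k : Nat) (hk : 0 < k) : (2 * k) &&& (2 * k - 1) = 2 * (k &&& (k - 1)) := by
  apply Nat.eq_of_testBit_eq
  intro i
  cases i with
  | zero =>
    have h1 : (2 * k) % 2 = 0 := by omega
    have h2 : (2 * (k &&& (k - 1))) % 2 = 0 := by omega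
    simp [Nat.testBit_zero, h1, h2]
  | succ i =>
    have h1 : (2 * k) / 2 = k := by omega
    have h2 : (2 * k - 1) / 2 = k - 1 := by omega
    have h3 : (2 * (k &&& (k - 1))) / 2 = k &&& (k - 1) := by omega
    rw [Nat.testBit_land, Nat.testBit_succ, Nat.testBit_succ, Nat.testBit_succ, h1, h2, h3,
      Nat.testBit_land]

lemma pv_xor_double (a b : Nat) : (2 * a) ^^^ (2 * b) = 2 * (a ^^^ b) := by
  apply Nat.eq_of_testBit_eq
  intro i
  cases i with
  | zero =>
    have h1 : (2 * a) % 2 = 0 := by omega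
    have h2 : (2 * b) % 2 = 0 := by omega
    have h3 : (2 * (a ^^^ b)) % 2 = 0 := by omega
    simp [Nat.testBit_zero, h1, h3]
  | succ i =>
    have h1 : (2 * a) / 2 = a := by omega
    have h2 : (2 * b) / 2 = b := by omega
    have h3 : (2 * (a ^^^ b)) / 2 = a ^^^ b := by omega
    rw [Nat.testBit_xor, Nat.testBit_succ, Nat.testBit_succ, Nat.testBit_succ, h1, h2, h3,
      Nat.testBit_xor]

-- python's m & -m for a positive m, in terms of Nat operations
lemma pv_band_neg (m : Nat) (h : 0 < m) :
    PySem.Int.band (m : Int) (-(m : Int)) = ((m - (m &&& (m - 1)) : Nat) : Int) := by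
  have h0 : (0 : Int) ≤ (m : Int) := by positivity
  have h1 : ¬ (0 : Int) ≤ -(m : Int) := by
    simp only [not_le]
    omega
  have h2 : ((m : Int)).toNat = m := Int.toNat_natCast m
  have h3 : (-(-(m : Int)) - 1).toNat = m - 1 := by omega
  simp only [PySem.Int.band, if_pos h0, if_neg h1, h2, h3]

lemma pv_pyGetD_cons_succ (b : Int) (tl : List Int) (i : Nat) :
    PySem.List.pyGetD (b :: tl) ((i : Int) + 1) 0 = PySem.List.pyGetD tl (i : Int) 0 := by
  have h : ((i : Int) + 1) = ((i + 1 : Nat) : Int) := by push_cast; ring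
  rw [h, PySem.List.pyGetD_natCast, PySem.List.pyGetD_natCast]
  simp [List.getD]

-- PySem.Int.bxor is core Int.xor; used to borrow associativity from Nat.xor_assoc
lemma pv_bxor_eq_xor (a b : Int) : PySem.Int.bxor a b = a.xor b := by
  cases a <;> cases b <;> simp [PySem.Int.bxor, Int.xor] <;> omega

lemma pv_bxor_assoc (a b c : Int) :
    PySem.Int.bxor (PySem.Int.bxor a b) c = PySem.Int.bxor a (PySem.Int.bxor b c) := by
  simp only [pv_bxor_eq_xor]
  cases a <;> cases b <;> cases c <;> simp [Int.xor, Nat.xor_assoc]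

-- ---- the recurrence A's loop body computes, for every 0 < m < 2^len ----
lemma pv_main : ∀ (m : Nat) (bs : List Int), 0 < m → m < 2 ^ bs.length →
    (m &&& (m - 1)) < m ∧
    (m ^^^ (m - (m &&& (m - 1)))) = (m &&& (m - 1)) ∧
    ∃ i : Nat, PySem.Int.bitLength ((m - (m &&& (m - 1)) : Nat) : Int) = i + 1 ∧ i < bs.length ∧
      pvF bs m = PySem.Int.bxor (pvF bs (m &&& (m - 1))) (PySem.List.pyGetD bs (i : Int) 0) ∧
      pvC bs.length m = pvC bs.length (m &&& (m - 1)) + 1 := by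
  intro m
  induction m using Nat.strong_induction_on with
  | _ m IH =>
    intro bs h1 h2
    obtain ⟨b, tl, rfl⟩ : ∃ b tl, bs = b :: tl := by
      cases bs with
      | nil => simp at h2; omega
      | cons b tl => exact ⟨b, tl, rfl⟩
    have hlen : (b :: tl).length = tl.length + 1 := rfl
    have hpow : 2 ^ (tl.length + 1) = 2 ^ tl.length * 2 := pow_succ 2 tl.length
    rcases Nat.mod_two_eq_zero_or_one m with hp | hp
    · -- even case: m = 2 * k
      obtain ⟨k, rfl⟩ : ∃ k, m = 2 * k := ⟨m / 2, by omega⟩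
      have hk0 : 0 < k := by omega
      have hk2 : k < 2 ^ tl.length := by rw [hlen] at h2; omega
      obtain ⟨ihlt, ihxor, i, ihbl, ihilt, ihF, ihC⟩ := IH k (by omega) tl hk0 hk2
      have hland : (2 * k) &&& (2 * k - 1) = 2 * (k &&& (k - 1)) := pv_land_even k hk0
      have hsub : 2 * k - 2 * (k &&& (k - 1)) = 2 * (k - (k &&& (k - 1))) := by omega
      refine ⟨by omega, ?_, i + 1, ?_, by simp [hlen]; omega, ?_, ?_⟩
      · rw [hland, hsub, pv_xor_double, ihxor]
      · rw [hland, hsub]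
        have hpos : 0 < 2 * (k - (k &&& (k - 1))) := by omega
        rw [PySem.Int.bitLength_natCast hpos]
        have hd : 2 * (k - (k &&& (k - 1))) / 2 = k - (k &&& (k - 1)) := by omega
        rw [hd, ihbl]
      · rw [hland]
        have hm2 : (2 * k) % 2 = 0 := by omega
        have hd2 : (2 * k) / 2 = k := by omega
        have ht2 : (2 * (k &&& (k - 1))) % 2 = 0 := by omega
        have htd : (2 * (k &&& (k - 1))) / 2 = k &&& (k - 1) := by omega
        simp only [pvF, hm2, hd2, ht2, htd]
        norm_num [pv_zero_bxor]
        rw [pv_pyGetD_cons_succ]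
        exact ihF
      · rw [hland]
        have hm2 : (2 * k) % 2 = 0 := by omega
        have hd2 : (2 * k) / 2 = k := by omega
        have ht2 : (2 * (k &&& (k - 1))) % 2 = 0 := by omega
        have htd : (2 * (k &&& (k - 1))) / 2 = k &&& (k - 1) := by omega
        simp only [hlen, pvC, hm2, hd2, ht2, htd]
        norm_num
        omega
    · -- odd case
      have hland : m &&& (m - 1) = m - 1 := pv_land_odd m hp
      have hs1 : m - (m - 1) = 1 := by omega
      refine ⟨by omega, ?_, 0, ?_, by simp [hlen], ?_, ?_⟩
      · rw [hland, hs1, pv_xor_one_odd m hp]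
      · rw [hland, hs1]
        decide
      · rw [hland]
        have hd1 : (m - 1) % 2 = 0 := by omega
        have hd2 : (m - 1) / 2 = m / 2 := by omega
        simp only [pvF, hp, hd1, hd2]
        norm_num [pv_zero_bxor]
        exact PySem.Int.bxor_comm b _
      · rw [hland]
        have hd1 : (m - 1) % 2 = 0 := by omega
        have hd2 : (m - 1) / 2 = m / 2 := by omega
        simp only [hlen, pvC, hp, hd1, hd2]
        norm_num
        ring

-- ---- glue for reading/writing the arrays ----

lemma pv_set_append (l1 l2 : List Int) (v : Int) :
    (l1 ++ l2).set l1.length v = l1 ++ l2.set 0 v := by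
  induction l1 with
  | nil => simp
  | cons a t ih => simp [ih]

lemma pv_getD_map_range (f : Nat → Int) (m t : Nat) (h : t < m) (l2 : List Int) :
    PySem.List.pyGetD ((List.range m).map f ++ l2) (t : Int) 0 = f t := by
  rw [PySem.List.pyGetD_natCast, List.getD_append _ _ _ t (by simpa using h)]
  simp [List.getD, h]

-- ---- A's loop invariant: after iterations s = 1 .. j the arrays hold the spec values up to j ----
lemma pv_A_loop (bs : List Int) : ∀ (j : Nat), j < 2 ^ bs.length →
    (PySem.List.pyRange 1 ((1 : Int) + (j : Int))).foldl (pvAstep bs)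
      (List.replicate (2 ^ bs.length) 0, List.replicate (2 ^ bs.length) 0) =
    ((List.range (j + 1)).map (pvF bs) ++ List.replicate (2 ^ bs.length - (j + 1)) 0,
     (List.range (j + 1)).map (pvC bs.length) ++ List.replicate (2 ^ bs.length - (j + 1)) 0) := by
  intro j
  induction j with
  | zero =>
    intro hj
    have hr : PySem.List.pyRange 1 ((1 : Int) + (0 : Nat)) = [] := by norm_num
    rw [hr]
    have hN : 2 ^ bs.length = (2 ^ bs.length - 1) + 1 := by
      have := Nat.one_le_two_pow (n := bs.length); omega
    simp only [List.foldl_nil]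
    rw [hN, List.replicate_succ]
    simp
    exact ⟨(pvF_zero bs).symm, (pvC_zero bs.length).symm⟩
  | succ j ihj =>
    intro hj
    have hj' : j < 2 ^ bs.length := by omega
    have hr : PySem.List.pyRange 1 ((1 : Int) + ((j + 1 : Nat) : Int)) =
        PySem.List.pyRange 1 ((1 : Int) + (j : Int)) ++ [(1 : Int) + (j : Int)] := by
      have h1 : ((1 : Int) + ((j + 1 : Nat) : Int)) = ((1 : Int) + (j : Int)) + 1 := by push_cast; ring
      rw [h1, PySem.List.pyRange_one_succ_right (by omega)]
    rw [hr, List.foldl_append, ihj hj']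
    simp only [List.foldl_cons, List.foldl_nil]
    -- the single new iteration with s = j + 1
    have hm1 : 0 < j + 1 := by omega
    obtain ⟨hlt, hxor, i, hbl, hilt, hF, hC⟩ := pv_main (j + 1) bs hm1 hj
    have hcast : (1 : Int) + (j : Int) = ((j + 1 : Nat) : Int) := by push_cast; ring
    rw [hcast]
    simp only [pvAstep]
    rw [pv_band_neg (j + 1) hm1, PySem.Int.bxor_natCast, hxor, hbl]
    have hidx : ((↑(i + 1) : Int) - 1) = (i : Int) := by push_cast; ring
    rw [hidx]
    have htoNat : (((j + 1 : Nat) : Int)).toNat = j + 1 := Int.toNat_natCast _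
    rw [htoNat]
    have hlen1 : ((List.range (j + 1)).map (pvF bs)).length = j + 1 := by simp
    have hlen2 : ((List.range (j + 1)).map (pvC bs.length)).length = j + 1 := by simp
    have hrep : 2 ^ bs.length - (j + 1) = (2 ^ bs.length - (j + 1 + 1)) + 1 := by omega
    rw [pv_getD_map_range _ _ _ hlt, pv_getD_map_range _ _ _ hlt]
    rw [← hF, ← hC]
    have hsa1 := pv_set_append ((List.range (j + 1)).map (pvF bs))
      (List.replicate (2 ^ bs.length - (j + 1)) 0) (pvF bs (j + 1))
    rw [hlen1] at hsa1
    have hsa2 := pv_set_append ((List.range (j + 1)).map (pvC bs.length))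
      (List.replicate (2 ^ bs.length - (j + 1)) 0) (pvC bs.length (j + 1))
    rw [hlen2] at hsa2
    rw [hsa1, hsa2, hrep, List.replicate_succ]
    simp only [List.set_cons_zero]
    rw [show List.range (j + 1 + 1) = List.range (j + 1) ++ [j + 1] from List.range_succ]
    simp

-- A computes the spec arrays
lemma pv_A_eq (bs : List Int) :
    subset_xor_arrays bs =
      ((List.range (2 ^ bs.length)).map (pvF bs), (List.range (2 ^ bs.length)).map (pvC bs.length)) := by
  have hN : 0 < 2 ^ bs.length := by positivity
  have hsize : 1 <<< bs.length = 2 ^ bs.length := by rw [Nat.shiftLeft_eq, one_mul]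
  have hcast : ((2 ^ bs.length : Nat) : Int) = (1 : Int) + ((2 ^ bs.length - 1 : Nat) : Int) := by omega
  have h := pv_A_loop bs (2 ^ bs.length - 1) (by omega)
  have hfix : 2 ^ bs.length - 1 + 1 = 2 ^ bs.length := by omega
  rw [hfix] at h
  simp only [subset_xor_arrays, hsize, hcast, h, Nat.sub_self, List.replicate_zero, List.append_nil]

-- ---- B's doubling invariant ----

lemma pvF_lo : ∀ (p : List Int) (b : Int) (s : Nat), s < 2 ^ p.length → pvF (p ++ [b]) s = pvF p s := by
  intro p
  induction p with
  | nil =>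
    intro b s hs
    have : s = 0 := by simpa using hs
    subst this
    simp [pvF]
  | cons a q ih =>
    intro b s hs
    have hpow : 2 ^ (q.length + 1) = 2 ^ q.length * 2 := pow_succ 2 q.length
    have hs2 : s / 2 < 2 ^ q.length := by simp only [List.length_cons] at hs; omega
    simp only [List.cons_append, pvF]
    rw [ih b (s / 2) hs2]

lemma pvF_hi : ∀ (p : List Int) (b : Int) (s : Nat), s < 2 ^ p.length →
    pvF (p ++ [b]) (2 ^ p.length + s) = PySem.Int.bxor (pvF p s) b := by
  intro p
  induction p with
  | nil =>
    intro b s hs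
    have : s = 0 := by simpa using hs
    subst this
    simp [pvF, pv_zero_bxor]
  | cons a q ih =>
    intro b s hs
    have hpow : 2 ^ (q.length + 1) = 2 ^ q.length * 2 := pow_succ 2 q.length
    simp only [List.length_cons] at hs ⊢
    have hs2 : s / 2 < 2 ^ q.length := by omega
    have hm : (2 ^ (q.length + 1) + s) % 2 = s % 2 := by omega
    have hd : (2 ^ (q.length + 1) + s) / 2 = 2 ^ q.length + s / 2 := by omega
    simp only [List.cons_append, pvF, hm, hd]
    rw [ih b (s / 2) hs2, pv_bxor_assoc]

lemma pvC_lo : ∀ (n s : Nat), s < 2 ^ n → pvC (n + 1) s = pvC n s := by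
  intro n
  induction n with
  | zero =>
    intro s hs
    have : s = 0 := by simpa using hs
    subst this
    simp [pvC]
  | succ n ih =>
    intro s hs
    have hpow : 2 ^ (n + 1) = 2 ^ n * 2 := pow_succ 2 n
    have hs2 : s / 2 < 2 ^ n := by omega
    have hunf1 : pvC (n + 1 + 1) s = (if s % 2 = 1 then 1 else 0) + pvC (n + 1) (s / 2) := rfl
    have hunf2 : pvC (n + 1) s = (if s % 2 = 1 then 1 else 0) + pvC n (s / 2) := rfl
    rw [hunf1, hunf2, ih (s / 2) hs2]

lemma pvC_hi : ∀ (n s : Nat), s < 2 ^ n → pvC (n + 1) (2 ^ n + s) = pvC n s + 1 := by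
  intro n
  induction n with
  | zero =>
    intro s hs
    have : s = 0 := by simpa using hs
    subst this
    simp [pvC]
  | succ n ih =>
    intro s hs
    have hpow : 2 ^ (n + 1) = 2 ^ n * 2 := pow_succ 2 n
    have hs2 : s / 2 < 2 ^ n := by omega
    have hm : (2 ^ (n + 1) + s) % 2 = s % 2 := by omega
    have hd : (2 ^ (n + 1) + s) / 2 = 2 ^ n + s / 2 := by omega
    have hunf1 : pvC (n + 1 + 1) (2 ^ (n + 1) + s) =
        (if (2 ^ (n + 1) + s) % 2 = 1 then 1 else 0) + pvC (n + 1) ((2 ^ (n + 1) + s) / 2) := rfl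
    have hunf2 : pvC (n + 1) s = (if s % 2 = 1 then 1 else 0) + pvC n (s / 2) := rfl
    rw [hunf1, hm, hd, ih (s / 2) hs2, hunf2]
    ring

lemma pv_B_loop : ∀ (p : List Int),
    p.foldl pvBstep ([0], [0]) =
      ((List.range (2 ^ p.length)).map (pvF p), (List.range (2 ^ p.length)).map (pvC p.length)) := by
  intro p
  induction p using List.reverseRecOn with
  | nil => simp [pvF, pvC]
  | append_singleton q b ih =>
    rw [List.foldl_append, ih]
    simp only [List.foldl_cons, List.foldl_nil, pvBstep]
    have hlen : (q ++ [b]).length = q.length + 1 := by simp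
    have hpow : 2 ^ (q.length + 1) = 2 ^ q.length + 2 ^ q.length := by
      rw [pow_succ]; omega
    rw [hlen, hpow, List.range_add]
    simp only [List.map_append, List.map_map]
    congr 1
    · congr 1
      · exact List.map_congr_left (fun s hs => (pvF_lo q b s (List.mem_range.mp hs)).symm)
      · exact List.map_congr_left (fun s hs => by
          simp only [Function.comp_apply]
          exact (pvF_hi q b s (List.mem_range.mp hs)).symm)
    · congr 1
      · exact List.map_congr_left (fun s hs => (pvC_lo q.length s (List.mem_range.mp hs)).symm)
      · exact List.map_congr_left (fun s hs => by
          simp only [Function.comp_apply]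
          exact (pvC_hi q.length s (List.mem_range.mp hs)).symm)

-- ===== VERDICT (by name: the statement is the Claim_ definition above) =====
theorem subset_xor_arrays_spec : Claim_equal_subset_xor_arrays := by
  unfold Claim_equal_subset_xor_arrays
  intro buttons _
  unfold Spec_subset_xor_arrays subset_xor_arrays_alt
  rw [pv_A_eq, pv_B_loop]
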